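-- pv_equiv track=rewrite | github.com/MenyNicolas/21 | transform_data.py | hi_lo_count
-- ===== SOURCE A (Python) =====
-- def hi_lo_count(row):
--     main_joueur = row['main_joueur']
--     main_dealer = row['main_dealer']
--
--     count = 0
--
--     for carte in (main_joueur + main_dealer):
--         if(carte in [2, 3, 4, 5, 6]):
--             count += 1
--         elif(carte in [10, 11]):
--             count -= 1
--
--     return count
-- ===== SOURCE B (Python) =====
-- def hi_lo_count(row):
--     freq = {}
--     for carte in row['main_joueur'] + row['main_dealer']:
--         freq[carte] = freq.get(carte, 0) + 1
--     return sum(freq.get(v, 0) for v in (2, 3, 4, 5, 6)) \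
--          - sum(freq.get(v, 0) for v in (10, 11))
-- ===== Notes on version B (the rewrite author's own statement) =====
-- stated objective: alternative
-- what changed: Replaces the single branching accumulation loop over the cards with building a frequency table first and then summing two fixed-size groups of table lookups (lows minus highs).
import Mathlib
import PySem

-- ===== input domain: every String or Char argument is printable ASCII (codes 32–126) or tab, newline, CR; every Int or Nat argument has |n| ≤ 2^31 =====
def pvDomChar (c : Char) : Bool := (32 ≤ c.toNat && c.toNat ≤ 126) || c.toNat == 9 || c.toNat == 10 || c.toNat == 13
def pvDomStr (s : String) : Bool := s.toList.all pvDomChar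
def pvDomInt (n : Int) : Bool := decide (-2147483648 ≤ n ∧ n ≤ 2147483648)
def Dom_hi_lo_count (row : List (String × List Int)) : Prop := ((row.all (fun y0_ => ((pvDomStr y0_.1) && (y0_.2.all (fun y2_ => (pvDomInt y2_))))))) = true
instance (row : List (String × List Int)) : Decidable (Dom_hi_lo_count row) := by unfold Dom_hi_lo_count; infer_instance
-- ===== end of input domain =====

-- B builds a frequency table of the combined hand, then sums fixed lookups (lows minus highs) instead of one branching loop.

-- ===== PORT A =====
def hi_lo_count (row : List (String × List Int)) : Int :=
  let d := PySem.Dict.ofList row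
  let main_joueur := d.getD "main_joueur" []
  let main_dealer := d.getD "main_dealer" []
  (main_joueur ++ main_dealer).foldl (fun count carte =>
    if [2, 3, 4, 5, 6].contains carte then count + 1
    else if [10, 11].contains carte then count - 1
    else count) 0

-- ===== PORT B =====
def hi_lo_count_alt (row : List (String × List Int)) : Int :=
  let d := PySem.Dict.ofList row
  let freq := ((d.getD "main_joueur" []) ++ (d.getD "main_dealer" [])).foldl
    (fun f carte => f.insert carte (f.getD carte 0 + 1)) PySem.Dict.empty
  ([2, 3, 4, 5, 6].foldl (fun s v => s + freq.getD v 0) 0)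
    - ([10, 11].foldl (fun s v => s + freq.getD v 0) 0)

-- ===== PRECONDITION & SPEC =====
-- Pre_ excludes rows missing either key, where the Python A raises KeyError (B raises too).
def Pre_hi_lo_count (row : List (String × List Int)) : Prop :=
  "main_joueur" ∈ row.map Prod.fst ∧ "main_dealer" ∈ row.map Prod.fst
instance (row : List (String × List Int)) : Decidable (Pre_hi_lo_count row) := by unfold Pre_hi_lo_count; infer_instance
def pvWitness_hi_lo_count : (List (String × List Int)) :=
  [("main_joueur", [2, 10, 11]), ("main_dealer", [7, 5])]
def Spec_hi_lo_count (row : List (String × List Int)) (out : Int) : Prop := out = hi_lo_count_alt row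
instance (row : List (String × List Int)) (out : Int) : Decidable (Spec_hi_lo_count row out) := by unfold Spec_hi_lo_count; infer_instance

-- ===== CLAIM (what is proved, stated in full; the proofs are below) =====
def Claim_equal_hi_lo_count : Prop := ∀ (row : List (String × List Int)), Dom_hi_lo_count row → Pre_hi_lo_count row → Spec_hi_lo_count row (hi_lo_count row)

-- ===== LEMMAS AND PROOFS =====

-- A's branching loop computes (#lows) − (#highs) of the traversed list.
lemma hi_lo_foldl_counts (l : List Int) (a : Int) :
    l.foldl (fun count carte =>
      if [2, 3, 4, 5, 6].contains carte then count + 1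
      else if [10, 11].contains carte then count - 1
      else count) a
    = a + ((l.count 2 + l.count 3 + l.count 4 + l.count 5 + l.count 6 : Nat) : Int)
        - ((l.count 10 + l.count 11 : Nat) : Int) := by
  induction l generalizing a with
  | nil => simp
  | cons x l ih =>
    rw [List.foldl_cons]
    by_cases h2 : x = 2
    · subst h2; rw [ih]; simp; push_cast; ring
    by_cases h3 : x = 3
    · subst h3; rw [ih]; simp; push_cast; ring
    by_cases h4 : x = 4
    · subst h4; rw [ih]; simp; push_cast; ring
    by_cases h5 : x = 5
    · subst h5; rw [ih]; simp; push_cast; ring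
    by_cases h6 : x = 6
    · subst h6; rw [ih]; simp; push_cast; ring
    by_cases h10 : x = 10
    · subst h10; rw [ih]; simp; push_cast; ring
    by_cases h11 : x = 11
    · subst h11; rw [ih]; simp; push_cast; ring
    rw [ih]
    simp [List.count_cons, h2, h3, h4, h5, h6, h10, h11]

theorem hi_lo_count_spec : Claim_equal_hi_lo_count := by
  intro row _ _
  unfold Spec_hi_lo_count hi_lo_count hi_lo_count_alt
  simp only [hi_lo_foldl_counts, PySem.Dict.getD_foldl_insert_add_one, PySem.Dict.getD_empty,
    List.foldl_cons, List.foldl_nil]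
  push_cast
  ring
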